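-- pv_equiv track=rewrite | github.com/cuongvu12a/CTDL_GT | contest/8. Hàng đợi/8.9.py | solve
-- ===== SOURCE A (Python) =====
-- from collections import deque
--
-- def solve(S, T):
--     # Trường hợp đặc biệt: Nếu S >= T, chỉ có một cách duy nhất là trừ 1 liên tục
--     if S >= T:
--         return str(S - T)
--
--     # Giới hạn mảng visited. Vì T < 10000, ngưỡng 20000 là an toàn
--     # để thực hiện phép nhân 2 rồi trừ dần về T nếu cần.
--     limit = 20000
--     visited = [False] * (limit + 1)
--
--     # Queue lưu (giá trị hiện tại, số bước)
--     queue = deque([(S, 0)])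
--     visited[S] = True
--
--     while queue:
--         curr_val, curr_step = queue.popleft()
--
--         # Nếu đạt đến mục tiêu, trả về số bước
--         if curr_val == T:
--             return str(curr_step)
--
--         # 1. Thao tác Nhân 2 (b):
--         # Chỉ nhân nếu giá trị hiện tại nhỏ hơn T và chưa vượt quá giới hạn an toàn
--         # (Nếu curr_val > T, nhân 2 chỉ làm tốn thêm bước)
--         mult_val = curr_val * 2
--         if curr_val < T and mult_val <= limit and not visited[mult_val]:
--             visited[mult_val] = True
--             queue.append((mult_val, curr_step + 1))
--
--         # 2. Thao tác Trừ 1 (a):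
--         # Chỉ trừ nếu giá trị > 0 và chưa từng ghé thăm
--         sub_val = curr_val - 1
--         if sub_val > 0 and not visited[sub_val]:
--             visited[sub_val] = True
--             queue.append((sub_val, curr_step + 1))
-- ===== SOURCE B (Python) =====
-- def solve(S, T):
--     # Greedy from T: halve when even, else add 1 (reverse of double / minus-1). O(log T).
--     c = 0
--     while T > S:
--         if T % 2:
--             T += 1
--         else:
--             T //= 2
--         c += 1
--     return str(c + S - T)
-- ===== Notes on version B (the rewrite author's own statement) =====
-- stated objective: faster
-- what changed: Replaces the BFS over the value space 1..20000 (queue + visited array) by the classic greedy working backwards from T - halve T when even, else add 1, then finish with S-T subtractions - which computes the same minimum number of operations in O(log T).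
-- outside the precondition, e.g. on solve(2, 30000): A returns None, B returns '19'; on solve(0, 5): A returns None, B does not finish within the time limit
import Mathlib
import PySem

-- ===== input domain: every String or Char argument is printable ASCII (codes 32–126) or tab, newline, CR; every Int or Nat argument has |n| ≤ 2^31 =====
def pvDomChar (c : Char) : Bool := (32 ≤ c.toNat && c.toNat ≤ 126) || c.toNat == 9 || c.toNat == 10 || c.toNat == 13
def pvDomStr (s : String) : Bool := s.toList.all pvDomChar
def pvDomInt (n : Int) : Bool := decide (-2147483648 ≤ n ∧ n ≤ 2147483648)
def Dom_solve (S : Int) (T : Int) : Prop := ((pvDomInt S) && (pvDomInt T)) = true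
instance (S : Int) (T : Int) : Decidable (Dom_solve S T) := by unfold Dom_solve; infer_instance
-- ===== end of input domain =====

-- B replaces A's BFS over the whole value range 1..20000 by the greedy reverse walk from T
-- (halve when even, else +1): an asymptotically faster exact re-implementation.

-- ===== PORT A =====
-- A's `visited` list is ported as a Boolean predicate updated pointwise; this is exact on every
-- input admitted by Pre_solve, where all indices A touches lie in 0..20000 (no negative-index
-- wraparound, no IndexError).  The fuel 40002 exceeds the largest possible number of loop
-- iterations (≤ 1 + 2·20000 by the visited bookkeeping), so it is only a totality guard; ""
-- stands for Python's falling off the loop with `None` (outside Pre_solve).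
def pvGet (vis : Array Bool) (x : Int) : Bool := (vis[x.toNat]?).getD false

def pvSet (vis : Array Bool) (x : Int) : Array Bool := vis.setIfInBounds x.toNat true

def bfsLoop (T : Int) : Nat → List (Int × Int) → Array Bool → String
  | 0, _, _ => ""
  | _ + 1, [], _ => ""
  | f + 1, (v, s) :: q, vis =>
    if v = T then PySem.Int.toStr s
    else
      -- `if curr_val < T and mult_val <= limit and not visited[mult_val]`
      if v < T ∧ v * 2 ≤ 20000 ∧ pvGet vis (v * 2) = false then
        -- `if sub_val > 0 and not visited[sub_val]`
        if 1 ≤ v - 1 ∧ pvGet (pvSet vis (v * 2)) (v - 1) = false then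
          bfsLoop T f (q ++ [(v * 2, s + 1), (v - 1, s + 1)]) (pvSet (pvSet vis (v * 2)) (v - 1))
        else
          bfsLoop T f (q ++ [(v * 2, s + 1)]) (pvSet vis (v * 2))
      else
        if 1 ≤ v - 1 ∧ pvGet vis (v - 1) = false then
          bfsLoop T f (q ++ [(v - 1, s + 1)]) (pvSet vis (v - 1))
        else
          bfsLoop T f q vis

def solve (S : Int) (T : Int) : String :=
  if S ≥ T then PySem.Int.toStr (S - T)
  else bfsLoop T 40002 [(S, 0)] (pvSet (Array.replicate 20001 false) S)

-- ===== PORT B =====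
-- Greedy from T: while T > S, add 1 when T is odd, else halve; finish with S - T subtractions.
-- The fuel 64 is only a totality guard (inside Pre_solve at most 2·15 + 2 iterations happen);
-- none/"" is never reached on Pre_solve.
def altLoop (S : Int) : Nat → Int → Int → Option (Int × Int)
  | 0, _, _ => none
  | f + 1, t, c =>
    if t > S then
      if PySem.Int.mod t 2 ≠ 0 then altLoop S f (t + 1) (c + 1)
      else altLoop S f (PySem.Int.floordiv t 2) (c + 1)
    else some (t, c)

def solve_alt (S : Int) (T : Int) : String :=
  match altLoop S 64 T 0 with
  | some (t, c) => PySem.Int.toStr (c + S - t)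
  | none => ""

-- ===== PRECONDITION & SPEC =====
-- Pre_solve excludes exactly the inputs on which A does not return a str: for S < 0 (and S < T)
-- A's doubling drives the visited index below -20001 and raises IndexError, and for S = 0 < T or
-- 1 ≤ S < T with T > 20000 A's BFS exhausts its bounded search space and returns None.
def Pre_solve (S : Int) (T : Int) : Prop := T ≤ S ∨ (1 ≤ S ∧ S < T ∧ T ≤ 20000)
instance (S : Int) (T : Int) : Decidable (Pre_solve S T) := by unfold Pre_solve; infer_instance

def pvWitness_solve : Int × Int := (3, 10)

def Spec_solve (S : Int) (T : Int) (out : String) : Prop := out = solve_alt S T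
instance (S : Int) (T : Int) (out : String) : Decidable (Spec_solve S T out) := by unfold Spec_solve; infer_instance

-- ===== CLAIM (what is proved, stated in full; the proofs are below) =====
def Claim_equal_solve : Prop := ∀ (S : Int) (T : Int), Dom_solve S T → Pre_solve S T → Spec_solve S T (solve S T)

-- ===== LEMMAS AND PROOFS =====

-- The pruned step graph A's BFS explores: from u one may double (only below T and capped at
-- 20000) or subtract 1 (staying positive).
def pvEdge (T : Int) (u : Int) (w : Int) : Prop :=
  (w = u * 2 ∧ u < T ∧ u * 2 ≤ 20000) ∨ (w = u - 1 ∧ 1 ≤ u - 1)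

inductive pvReach (S T : Int) : Int → Nat → Prop
  | base : pvReach S T S 0
  | step {v w : Int} {n : Nat} : pvReach S T v n → pvEdge T v w → pvReach S T w (n + 1)

def pvDist (S T : Int) (v : Int) (n : Nat) : Prop :=
  pvReach S T v n ∧ ∀ m, pvReach S T v m → n ≤ m

-- The greedy cost from v down to S (B's count): the exact minimum number of operations.
def pvG (S : Int) (v : Int) : Nat :=
  if v ≤ max S 1 then (S - v).toNat
  else if v % 2 = 0 then 1 + pvG S (v / 2)
  else 2 + pvG S ((v + 1) / 2)
termination_by v.toNat
decreasing_by all_goals omega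

theorem pvG_le (S v : Int) (hS : 1 ≤ S) (h : v ≤ S) : pvG S v = (S - v).toNat := by
  rw [pvG]; simp [show v ≤ max S 1 by omega]

theorem pvG_even (S v : Int) (hS : 1 ≤ S) (h : S < v) (he : v % 2 = 0) :
    pvG S v = 1 + pvG S (v / 2) := by
  rw [pvG]; simp [show ¬ v ≤ max S 1 by omega, he]

theorem pvG_odd (S v : Int) (hS : 1 ≤ S) (h : S < v) (ho : v % 2 ≠ 0) :
    pvG S v = 2 + pvG S ((v + 1) / 2) := by
  rw [pvG]; simp [show ¬ v ≤ max S 1 by omega, ho]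

theorem pvG_succ_le (S : Int) (hS : 1 ≤ S) :
    ∀ (k : Nat) (v : Int), v.toNat ≤ k → 1 ≤ v → pvG S v ≤ pvG S (v + 1) + 2 := by
  intro k
  induction k with
  | zero => intro v hk hv; omega
  | succ k ih =>
    intro v hk hv
    by_cases hvS : v ≤ S
    · rw [pvG_le S v hS hvS]
      by_cases hv1 : v + 1 ≤ S
      · rw [pvG_le S (v + 1) hS hv1]; omega
      · omega
    · push_neg at hvS
      by_cases he : v % 2 = 0
      · rw [pvG_even S v hS hvS he]
        rw [pvG_odd S (v + 1) hS (by omega) (by omega)]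
        have h2 : (v + 1 + 1) / 2 = v / 2 + 1 := by omega
        rw [h2]
        have := ih (v / 2) (by omega) (by omega)
        omega
      · rw [pvG_odd S v hS hvS he]
        rw [pvG_even S (v + 1) hS (by omega) (by omega)]
        omega

theorem pvG_pred_le (S v : Int) (hS : 1 ≤ S) (h1 : 1 ≤ v - 1) :
    pvG S (v - 1) ≤ pvG S v + 1 := by
  by_cases hvS : v - 1 ≤ S
  · rw [pvG_le S (v - 1) hS hvS]
    by_cases hv : v ≤ S
    · rw [pvG_le S v hS hv]; omega
    · omega
  · push_neg at hvS
    by_cases he : v % 2 = 0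
    · rw [pvG_odd S (v - 1) hS hvS (by omega)]
      rw [pvG_even S v hS (by omega) he]
      have h2 : (v - 1 + 1) / 2 = v / 2 := by omega
      rw [h2]; omega
    · rw [pvG_even S (v - 1) hS hvS (by omega)]
      rw [pvG_odd S v hS (by omega) he]
      have h2 : (v + 1) / 2 = (v - 1) / 2 + 1 := by omega
      rw [h2]
      have := pvG_succ_le S hS ((v - 1) / 2).toNat ((v - 1) / 2) le_rfl (by omega)
      omega

theorem pvG_dbl_le (S v : Int) (hS : 1 ≤ S) (h1 : 1 ≤ v) : pvG S (v * 2) ≤ pvG S v + 1 := by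
  by_cases hvS : v * 2 ≤ S
  · rw [pvG_le S (v * 2) hS hvS, pvG_le S v hS (by omega)]; omega
  · push_neg at hvS
    rw [pvG_even S (v * 2) hS hvS (by omega)]
    have h2 : v * 2 / 2 = v := by omega
    rw [h2]; omega

theorem pvReach_pos (S T v : Int) (n : Nat) (hS : 1 ≤ S) (h : pvReach S T v n) : 1 ≤ v := by
  induction h with
  | base => exact hS
  | step _ e _ => rcases e with ⟨rfl, _, _⟩ | ⟨rfl, h2⟩ <;> omega

theorem pvReach_le (S T v : Int) (n : Nat) (hS2 : S ≤ 20000) (h : pvReach S T v n) :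
    v ≤ 20000 := by
  induction h with
  | base => exact hS2
  | step _ e ih => rcases e with ⟨rfl, _, h2⟩ | ⟨rfl, _⟩ <;> omega

theorem pvReach_lower (S T v : Int) (n : Nat) (hS : 1 ≤ S) (h : pvReach S T v n) :
    pvG S v ≤ n := by
  induction h with
  | base => simp [pvG_le S S hS le_rfl]
  | @step v' w n' hr e ih =>
    have hv' : 1 ≤ v' := pvReach_pos S T v' n' hS hr
    rcases e with ⟨rfl, _, _⟩ | ⟨rfl, h2⟩
    · have := pvG_dbl_le S v' hS hv'; omega
    · have := pvG_pred_le S v' hS h2; omega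

theorem pvReach_sub_chain (S T : Int) (hS : 1 ≤ S) :
    ∀ (k : Nat), 1 ≤ S - k → pvReach S T (S - k) k := by
  intro k
  induction k with
  | zero => intro _; simpa using pvReach.base
  | succ k ih =>
    intro h
    have h1 : 1 ≤ S - k := by push_cast at h ⊢; omega
    have : pvReach S T ((S - k) - 1) (k + 1) :=
      pvReach.step (ih h1) (Or.inr ⟨rfl, by push_cast at h ⊢; omega⟩)
    have he : (S - k) - 1 = S - (k + 1 : Nat) := by push_cast; ring
    rwa [he] at this

theorem pvReach_upper (S T : Int) (hS : 1 ≤ S) (hST : S < T) (hT : T ≤ 20000) :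
    ∀ (k : Nat) (v : Int), v.toNat ≤ k → 1 ≤ v → v ≤ T → pvReach S T v (pvG S v) := by
  intro k
  induction k with
  | zero => intro v hk hv _; omega
  | succ k ih =>
    intro v hk hv hvT
    by_cases hvS : v ≤ S
    · rw [pvG_le S v hS hvS]
      have hc := pvReach_sub_chain S T hS (S - v).toNat (by push_cast; omega)
      have he : S - ((S - v).toNat : Int) = v := by omega
      rwa [he] at hc
    · push_neg at hvS
      by_cases hev : v % 2 = 0
      · rw [pvG_even S v hS hvS hev]
        have hr := ih (v / 2) (by omega) (by omega) (by omega)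
        have hstep := pvReach.step hr
          (Or.inl ⟨rfl, by omega, by omega⟩ :
            pvEdge T (v / 2) (v / 2 * 2))
        have h2 : v / 2 * 2 = v := by omega
        rw [h2] at hstep
        have h3 : pvG S (v / 2) + 1 = 1 + pvG S (v / 2) := by omega
        rwa [h3] at hstep
      · rw [pvG_odd S v hS hvS hev]
        have hu1 : 1 ≤ (v + 1) / 2 := by omega
        have hr := ih ((v + 1) / 2) (by omega) hu1 (by omega)
        have hstep := pvReach.step hr
          (Or.inl ⟨rfl, by omega, by omega⟩ :
            pvEdge T ((v + 1) / 2) ((v + 1) / 2 * 2))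
        have hstep2 := pvReach.step hstep
          (Or.inr ⟨rfl, by omega⟩ :
            pvEdge T ((v + 1) / 2 * 2) ((v + 1) / 2 * 2 - 1))
        have h2 : (v + 1) / 2 * 2 - 1 = v := by omega
        rw [h2] at hstep2
        have h3 : pvG S ((v + 1) / 2) + 1 + 1 = 2 + pvG S ((v + 1) / 2) := by omega
        rwa [h3] at hstep2

theorem pvDist_G (S T : Int) (hS : 1 ≤ S) (hST : S < T) (hT : T ≤ 20000) :
    pvDist S T T (pvG S T) := by
  refine ⟨pvReach_upper S T hS hST hT T.toNat T le_rfl (by omega) le_rfl, ?_⟩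
  intro m hm
  exact pvReach_lower S T T m hS hm

theorem pvDist_unique (S T v : Int) (n m : Nat) (h1 : pvDist S T v n) (h2 : pvDist S T v m) :
    n = m :=
  le_antisymm (h1.2 m h2.1) (h2.2 n h1.1)

theorem pvDist_exists (S T v : Int) (m : Nat) (h : pvReach S T v m) :
    ∃ l, pvDist S T v l ∧ l ≤ m := by
  haveI : DecidablePred (fun n => pvReach S T v n) := fun n => Classical.propDecidable _
  have hex : ∃ n, pvReach S T v n := ⟨m, h⟩
  exact ⟨Nat.find hex, ⟨Nat.find_spec hex, fun k hk => Nat.find_le hk⟩, Nat.find_le h⟩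

theorem pvReach_inv (S T w : Int) (m : Nat) (h : pvReach S T w m) :
    (m = 0 ∧ w = S) ∨ ∃ p m', m = m' + 1 ∧ pvReach S T p m' ∧ pvEdge T p w := by
  cases h with
  | base => exact Or.inl ⟨rfl, rfl⟩
  | step hr e => exact Or.inr ⟨_, _, rfl, hr, e⟩

theorem pvDist_pred (S T u : Int) (n : Nat) (h : pvDist S T u (n + 1)) :
    ∃ p, pvEdge T p u ∧ pvDist S T p n := by
  rcases pvReach_inv S T u (n + 1) h.1 with ⟨h0, _⟩ | ⟨p, m', hm, hr, e⟩
  · omega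
  · obtain ⟨l, hl, hle⟩ := pvDist_exists S T p m' hr
    have : n + 1 ≤ l + 1 := h.2 (l + 1) (pvReach.step hl.1 e)
    have hln : l = n := by omega
    exact ⟨p, e, hln ▸ hl⟩

-- ===== BFS invariant =====

structure pvInv (S T : Int) (Q : List (Int × Int)) (vis : Array Bool) : Prop where
  j1 : ∀ p ∈ Q, pvGet vis p.1 = true ∧ ∃ n : Nat, p.2 = (n : Int) ∧ pvDist S T p.1 n
  j2 : Q.Pairwise (fun p q => p.2 ≤ q.2)
  j2b : ∀ p ∈ Q, ∀ q ∈ Q, p.2 ≤ q.2 + 1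
  j3 : ∀ u, pvGet vis u = true → (∀ p ∈ Q, p.1 ≠ u) → ∀ w, pvEdge T u w → pvGet vis w = true
  j4 : ∀ u (n : Nat), pvDist S T u n → (∀ q ∈ Q, (n : Int) ≤ q.2) → pvGet vis u = true
  j5 : pvGet vis T = true → ∃ p ∈ Q, p.1 = T
  j6 : pvGet vis S = true
  jsz : vis.size = 20001

noncomputable def pvCnt (vis : Array Bool) : Nat :=
  ((Finset.Icc (1 : Int) 20000).filter (fun x => pvGet vis x = false)).card

noncomputable def pvM (Q : List (Int × Int)) (vis : Array Bool) : Nat := Q.length + 2 * pvCnt vis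

theorem pvSet_size (vis : Array Bool) (x : Int) : (pvSet vis x).size = vis.size :=
  Array.size_setIfInBounds

theorem pvGet_pvSet_self (vis : Array Bool) (x : Int) (h0 : 0 ≤ x) (hx : x.toNat < vis.size) :
    pvGet (pvSet vis x) x = true := by
  unfold pvGet pvSet
  rw [Array.getElem?_setIfInBounds_self_of_lt hx]
  rfl

theorem pvGet_pvSet_ne (vis : Array Bool) (x y : Int) (h1 : 1 ≤ x) (hne : y ≠ x) :
    pvGet (pvSet vis x) y = pvGet vis y := by
  unfold pvGet pvSet
  rw [Array.getElem?_setIfInBounds_ne (by omega : x.toNat ≠ y.toNat)]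

theorem pvFoldSet_size (vis : Array Bool) (news : List (Int × Int)) :
    (news.foldl (fun W p => pvSet W p.1) vis).size = vis.size := by
  induction news generalizing vis with
  | nil => rfl
  | cons a l ih => rw [List.foldl_cons, ih, pvSet_size]

theorem pvCnt_upd (vis : Array Bool) (x : Int) (hx1 : 1 ≤ x) (hx2 : x ≤ 20000)
    (hsz : vis.size = 20001) (hf : pvGet vis x = false) :
    pvCnt (pvSet vis x) + 1 = pvCnt vis := by
  have hmem : x ∈ (Finset.Icc (1 : Int) 20000).filter (fun y => pvGet vis y = false) := by
    simp [Finset.mem_filter, Finset.mem_Icc, hf, hx1, hx2]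
  have hset : (Finset.Icc (1 : Int) 20000).filter (fun y => pvGet (pvSet vis x) y = false)
      = ((Finset.Icc (1 : Int) 20000).filter (fun y => pvGet vis y = false)).erase x := by
    ext y
    simp only [Finset.mem_erase, Finset.mem_filter]
    constructor
    · rintro ⟨hy, hv⟩
      by_cases hyx : y = x
      · subst hyx
        rw [pvGet_pvSet_self vis y (by omega) (by omega)] at hv
        simp at hv
      · rw [pvGet_pvSet_ne vis x y hx1 hyx] at hv
        exact ⟨hyx, hy, hv⟩
    · rintro ⟨hyx, hy, hv⟩
      exact ⟨hy, by rw [pvGet_pvSet_ne vis x y hx1 hyx]; exact hv⟩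
  unfold pvCnt
  rw [hset, Finset.card_erase_of_mem hmem]
  have hpos : 0 < ((Finset.Icc (1 : Int) 20000).filter (fun y => pvGet vis y = false)).card :=
    Finset.card_pos.mpr ⟨x, hmem⟩
  omega

theorem pvFoldSet_true (vis : Array Bool) (news : List (Int × Int)) (y : Int)
    (hsz : vis.size = 20001) (hrng : ∀ p ∈ news, 1 ≤ p.1 ∧ p.1 ≤ 20000) :
    pvGet (news.foldl (fun W p => pvSet W p.1) vis) y = true ↔
      pvGet vis y = true ∨ ∃ p ∈ news, p.1 = y := by
  induction news generalizing vis with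
  | nil => simp
  | cons a l ih =>
    have har := hrng a (by simp)
    have hsz' : (pvSet vis a.1).size = 20001 := by rw [pvSet_size, hsz]
    rw [List.foldl_cons, ih (pvSet vis a.1) hsz' (fun p hp => hrng p (by simp [hp]))]
    by_cases hy : y = a.1
    · constructor
      · intro _
        exact Or.inr ⟨a, by simp, hy.symm⟩
      · intro _
        exact Or.inl (by rw [hy]; exact pvGet_pvSet_self vis a.1 (by omega) (by omega))
    · rw [pvGet_pvSet_ne vis a.1 y (by omega) hy]
      constructor
      · rintro (h | ⟨p, hp, he⟩)
        · exact Or.inl h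
        · exact Or.inr ⟨p, by simp [hp], he⟩
      · rintro (h | ⟨p, hp, he⟩)
        · exact Or.inl h
        · rcases List.mem_cons.mp hp with rfl | hp'
          · exact absurd he.symm hy
          · exact Or.inr ⟨p, hp', he⟩

theorem pvCnt_fold (vis : Array Bool) (news : List (Int × Int))
    (hsz : vis.size = 20001)
    (hfresh : ∀ p ∈ news, pvGet vis p.1 = false)
    (hrng : ∀ p ∈ news, 1 ≤ p.1 ∧ p.1 ≤ 20000)
    (hnd : (news.map Prod.fst).Nodup) :
    pvCnt (news.foldl (fun W p => pvSet W p.1) vis) + news.length = pvCnt vis := by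
  induction news generalizing vis with
  | nil => simp
  | cons a l ih =>
    simp only [List.foldl_cons, List.length_cons]
    have ha := hfresh a (by simp)
    have har := hrng a (by simp)
    have h1 : pvCnt (l.foldl (fun W p => pvSet W p.1) (pvSet vis a.1)) + l.length
        = pvCnt (pvSet vis a.1) := by
      apply ih
      · rw [pvSet_size, hsz]
      · intro p hp
        have hne : p.1 ≠ a.1 := by
          simp only [List.map_cons, List.nodup_cons] at hnd
          intro he; exact hnd.1 (he ▸ List.mem_map_of_mem hp)
        rw [pvGet_pvSet_ne vis a.1 p.1 (by omega) hne]
        exact hfresh p (by simp [hp])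
      · intro p hp; exact hrng p (by simp [hp])
      · simp only [List.map_cons, List.nodup_cons] at hnd; exact hnd.2
    have h2 := pvCnt_upd vis a.1 har.1 har.2 hsz ha
    omega

-- every reachable vertex is visited once all visited vertices have visited neighbours
theorem pvAllReachVis (S T : Int) (vis : Array Bool) (h6 : pvGet vis S = true)
    (h3 : ∀ u, pvGet vis u = true → ∀ w, pvEdge T u w → pvGet vis w = true) :
    ∀ v (m : Nat), pvReach S T v m → pvGet vis v = true := by
  intro v m h
  induction h with
  | base => exact h6
  | step hr e ih => exact h3 _ ih _ e

theorem pvPairwise_of_mem {A : Type} (R : A → A → Prop) :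
    ∀ (l : List A), (∀ a ∈ l, ∀ b ∈ l, R a b) → l.Pairwise R
  | [], _ => .nil
  | a :: t, h =>
    .cons (fun b hb => h a (by simp) b (by simp [hb]))
      (pvPairwise_of_mem R t (fun x hx y hy => h x (by simp [hx]) y (by simp [hy])))

-- The BFS step: popping (v,s) with v ≠ T and appending the batch `news` of newly discovered
-- neighbours preserves the invariant and strictly decreases the measure.
theorem pvStep (S T : Int) (hS : 1 ≤ S) (hST : S < T) (hT : T ≤ 20000)
    (v s : Int) (Q' : List (Int × Int)) (vis : Array Bool)
    (hInv : pvInv S T ((v, s) :: Q') vis) (hvT : v ≠ T)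
    (news : List (Int × Int))
    (hstep : ∀ p ∈ news, p.2 = s + 1)
    (hedge : ∀ p ∈ news, pvEdge T v p.1 ∧ pvGet vis p.1 = false)
    (hnd : (news.map Prod.fst).Nodup)
    (hcomp : ∀ w, pvEdge T v w →
      pvGet (news.foldl (fun W p => pvSet W p.1) vis) w = true) :
    pvInv S T (Q' ++ news) (news.foldl (fun W p => pvSet W p.1) vis) ∧
      pvM (Q' ++ news) (news.foldl (fun W p => pvSet W p.1) vis) < pvM ((v, s) :: Q') vis := by
  set vis2 := news.foldl (fun W p => pvSet W p.1) vis with hv2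
  obtain ⟨hvisv, n, hsn, hdv⟩ := hInv.j1 (v, s) (by simp)
  replace hsn : s = (n : Int) := hsn
  replace hdv : pvDist S T v n := hdv
  have hv1 : 1 ≤ v := pvReach_pos S T v n hS hdv.1
  have hvle : v ≤ 20000 := pvReach_le S T v n (by omega) hdv.1
  have hrng : ∀ p ∈ news, 1 ≤ p.1 ∧ p.1 ≤ 20000 := by
    intro p hp
    rcases (hedge p hp).1 with ⟨he, _, h2⟩ | ⟨he, h2⟩ <;> rw [he] <;> omega
  have hsz2 : vis2.size = 20001 := by rw [hv2, pvFoldSet_size, hInv.jsz]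
  have hiff : ∀ y, pvGet vis2 y = true ↔ pvGet vis y = true ∨ ∃ p ∈ news, p.1 = y := by
    intro y; rw [hv2]; exact pvFoldSet_true vis news y hInv.jsz hrng
  have hmono : ∀ y, pvGet vis y = true → pvGet vis2 y = true := fun y h => (hiff y).mpr (Or.inl h)
  have htail_ge : ∀ q ∈ Q', s ≤ q.2 := by
    have h2 := hInv.j2
    rw [List.pairwise_cons] at h2
    exact fun q hq => h2.1 q hq
  have htail_le : ∀ q ∈ Q', q.2 ≤ s + 1 := fun q hq =>
    hInv.j2b q (by simp [hq]) (v, s) (by simp)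
  have hfresh : ∀ p ∈ news, pvGet vis p.1 = false := fun p hp => (hedge p hp).2
  have hnewdist : ∀ p ∈ news, pvDist S T p.1 (n + 1) := by
    intro p hp
    refine ⟨pvReach.step hdv.1 (hedge p hp).1, ?_⟩
    intro m hm
    by_contra hlt
    push_neg at hlt
    rcases pvReach_inv S T p.1 m hm with ⟨_, hps⟩ | ⟨pp, m', rfl, hrp, hep⟩
    · have hfp := hfresh p hp
      rw [hps, hInv.j6] at hfp
      simp at hfp
    · obtain ⟨l, hld, hll⟩ := pvDist_exists S T pp m' hrp
      have hvpp : pvGet vis pp = true := by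
        apply hInv.j4 pp l hld
        intro q hq'
        rcases List.mem_cons.mp hq' with rfl | hq''
        · show (l : Int) ≤ s; omega
        · have := htail_ge q hq''; omega
      have hppnot : ∀ q ∈ (v, s) :: Q', q.1 ≠ pp := by
        intro q hq' hqe
        obtain ⟨_, nq, hq2, hqd⟩ := hInv.j1 q hq'
        have hnql : nq = l := pvDist_unique S T pp nq l (hqe ▸ hqd) hld
        rcases List.mem_cons.mp hq' with rfl | hq''
        · replace hq2 : s = (nq : Int) := hq2; omega
        · have := htail_ge q hq''; omega
      have hvp1 := hInv.j3 pp hvpp hppnot p.1 hep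
      rw [hfresh p hp] at hvp1
      simp at hvp1
  have hj3' : ∀ u, pvGet vis2 u = true → (∀ p ∈ Q' ++ news, p.1 ≠ u) →
      ∀ w, pvEdge T u w → pvGet vis2 w = true := by
    intro u hu hno w he
    rcases (hiff u).mp hu with hvu | ⟨p, hp, hpe⟩
    · by_cases huv : u = v
      · subst huv; exact hcomp w he
      · apply hmono
        apply hInv.j3 u hvu ?_ w he
        intro q hq'
        rcases List.mem_cons.mp hq' with rfl | hq''
        · exact fun hh => huv hh.symm
        · exact hno q (List.mem_append_left _ hq'')
    · exact absurd hpe (hno p (List.mem_append_right _ hp))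
  have hInv2 : pvInv S T (Q' ++ news) vis2 := by
    refine ⟨?_, ?_, ?_, hj3', ?_, ?_, hmono S hInv.j6, hsz2⟩
    · -- j1
      intro p hp
      rcases List.mem_append.mp hp with h | h
      · obtain ⟨hv', n', hs', hd'⟩ := hInv.j1 p (by simp [h])
        exact ⟨hmono _ hv', n', hs', hd'⟩
      · refine ⟨(hiff p.1).mpr (Or.inr ⟨p, h, rfl⟩), n + 1, ?_, hnewdist p h⟩
        rw [hstep p h, hsn]; push_cast; ring
    · -- j2
      rw [List.pairwise_append]
      refine ⟨(List.pairwise_cons.mp hInv.j2).2, ?_, ?_⟩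
      · apply pvPairwise_of_mem
        intro a ha b hb
        rw [hstep a ha, hstep b hb]
      · intro a ha b hb
        rw [hstep b hb]
        exact htail_le a ha
    · -- j2b
      intro p hp q hq
      have hple : p.2 ≤ s + 1 := by
        rcases List.mem_append.mp hp with h | h
        · exact htail_le p h
        · exact le_of_eq (hstep p h)
      have hqge : s ≤ q.2 := by
        rcases List.mem_append.mp hq with h | h
        · exact htail_ge q h
        · rw [hstep q h]; omega
      omega
    · -- j4
      intro u m hd hq
      by_cases hm : (m : Int) ≤ s
      · apply hmono
        apply hInv.j4 u m hd
        intro q hq'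
        rcases List.mem_cons.mp hq' with rfl | hq''
        · exact hm
        · exact le_trans hm (htail_ge q hq'')
      · rcases hQ2 : Q' ++ news with _ | ⟨q0, Q2'⟩
        · exact pvAllReachVis S T vis2 (hmono S hInv.j6)
            (fun u' hu' w he => hj3' u' hu' (by rw [hQ2]; simp) w he) u m hd.1
        · have hq0 : q0 ∈ Q' ++ news := by rw [hQ2]; simp
          have hq0le : q0.2 ≤ s + 1 := by
            rcases List.mem_append.mp hq0 with h | h
            · exact htail_le q0 h
            · exact le_of_eq (hstep q0 h)
          have hmq0 := hq q0 hq0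
          have hmn : m = n + 1 := by omega
          subst hmn
          obtain ⟨pp, hep, hdpp⟩ := pvDist_pred S T u n hd
          have hvpp : pvGet vis pp = true := by
            apply hInv.j4 pp n hdpp
            intro q hq'
            rcases List.mem_cons.mp hq' with rfl | hq''
            · show (n : Int) ≤ s; omega
            · have := htail_ge q hq''; omega
          by_cases hppv : pp = v
          · subst hppv; exact hcomp u hep
          · have hppnot : ∀ q ∈ (v, s) :: Q', q.1 ≠ pp := by
              intro q hq' hqe
              rcases List.mem_cons.mp hq' with rfl | hq''
              · exact hppv hqe.symm
              · obtain ⟨_, nq, hq2, hqd⟩ := hInv.j1 q (by simp [hq''])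
                have hnq : nq = n := pvDist_unique S T pp nq n (hqe ▸ hqd) hdpp
                have hmle := hq q (List.mem_append_left _ hq'')
                omega
            exact hmono _ (hInv.j3 pp hvpp hppnot u hep)
    · -- j5
      intro hT2
      rcases (hiff T).mp hT2 with hvT2 | ⟨p, hp, hpe⟩
      · obtain ⟨p, hp, hpT⟩ := hInv.j5 hvT2
        rcases List.mem_cons.mp hp with rfl | hq
        · exact absurd hpT hvT
        · exact ⟨p, List.mem_append_left _ hq, hpT⟩
      · exact ⟨p, List.mem_append_right _ hp, hpe⟩
  refine ⟨hInv2, ?_⟩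
  have hcnt := pvCnt_fold vis news hInv.jsz hfresh hrng hnd
  rw [← hv2] at hcnt
  unfold pvM
  simp only [List.length_append, List.length_cons]
  omega

theorem bfsLoop_succ (T : Int) (f : Nat) (v s : Int) (q : List (Int × Int)) (vis : Array Bool) :
    bfsLoop T (f + 1) ((v, s) :: q) vis =
      if v = T then PySem.Int.toStr s
      else
        if v < T ∧ v * 2 ≤ 20000 ∧ pvGet vis (v * 2) = false then
          if 1 ≤ v - 1 ∧ pvGet (pvSet vis (v * 2)) (v - 1) = false then
            bfsLoop T f (q ++ [(v * 2, s + 1), (v - 1, s + 1)])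
              (pvSet (pvSet vis (v * 2)) (v - 1))
          else bfsLoop T f (q ++ [(v * 2, s + 1)]) (pvSet vis (v * 2))
        else
          if 1 ≤ v - 1 ∧ pvGet vis (v - 1) = false then
            bfsLoop T f (q ++ [(v - 1, s + 1)]) (pvSet vis (v - 1))
          else bfsLoop T f q vis := rfl

theorem bfs_main (S T : Int) (hS : 1 ≤ S) (hST : S < T) (hT : T ≤ 20000) :
    ∀ (f : Nat) (Q : List (Int × Int)) (vis : Array Bool),
      pvInv S T Q vis → pvM Q vis < f →
      bfsLoop T f Q vis = PySem.Int.toStr ((pvG S T : Nat) : Int) := by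
  intro f
  induction f with
  | zero => intro Q vis _ hM; omega
  | succ f ih =>
    intro Q vis hInv hM
    rcases Q with _ | ⟨⟨v, s⟩, Q'⟩
    · exfalso
      have hvT : pvGet vis T = true :=
        hInv.j4 T (pvG S T) (pvDist_G S T hS hST hT) (by intro q hq; simp at hq)
      obtain ⟨p, hp, _⟩ := hInv.j5 hvT
      simp at hp
    · obtain ⟨hvisv, n, hsn, hdv⟩ := hInv.j1 (v, s) (by simp)
      replace hsn : s = (n : Int) := hsn
      replace hdv : pvDist S T v n := hdv
      have hv1 : 1 ≤ v := pvReach_pos S T v n hS hdv.1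
      have hvle : v ≤ 20000 := pvReach_le S T v n (by omega) hdv.1
      rw [bfsLoop_succ]
      by_cases hvT : v = T
      · rw [if_pos hvT]
        have hg : n = pvG S T :=
          pvDist_unique S T T n (pvG S T) (hvT ▸ hdv) (pvDist_G S T hS hST hT)
        rw [hsn, hg]
      · rw [if_neg hvT]
        by_cases hc1 : v < T ∧ v * 2 ≤ 20000 ∧ pvGet vis (v * 2) = false
        · rw [if_pos hc1]
          by_cases hc2 : 1 ≤ v - 1 ∧ pvGet (pvSet vis (v * 2)) (v - 1) = false
          · rw [if_pos hc2]
            have hfr : pvGet vis (v - 1) = false := by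
              have h := hc2.2
              rwa [pvGet_pvSet_ne vis (v * 2) (v - 1) (by omega) (by omega)] at h
            obtain ⟨hI2, hM2⟩ := pvStep S T hS hST hT v s Q' vis hInv hvT
              [(v * 2, s + 1), (v - 1, s + 1)]
              (by intro p hp; simp at hp; rcases hp with rfl | rfl <;> rfl)
              (by intro p hp; simp at hp
                  rcases hp with rfl | rfl
                  · exact ⟨Or.inl ⟨rfl, hc1.1, hc1.2.1⟩, hc1.2.2⟩
                  · exact ⟨Or.inr ⟨rfl, hc2.1⟩, hfr⟩)
              (by simp; omega)
              (by intro w he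
                  rw [pvFoldSet_true vis _ w hInv.jsz
                    (by intro p hp; simp at hp; rcases hp with rfl | rfl <;> constructor <;> omega)]
                  rcases he with ⟨rfl, _, _⟩ | ⟨rfl, _⟩
                  · exact Or.inr ⟨(v * 2, s + 1), by simp, rfl⟩
                  · exact Or.inr ⟨(v - 1, s + 1), by simp, rfl⟩)
            simp only [List.foldl] at hI2 hM2
            exact ih _ _ hI2 (by omega)
          · rw [if_neg hc2]
            obtain ⟨hI2, hM2⟩ := pvStep S T hS hST hT v s Q' vis hInv hvT
              [(v * 2, s + 1)]
              (by intro p hp; simp at hp; rw [hp])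
              (by intro p hp; simp at hp; rw [hp]
                  exact ⟨Or.inl ⟨rfl, hc1.1, hc1.2.1⟩, hc1.2.2⟩)
              (by simp)
              (by intro w he
                  rw [pvFoldSet_true vis _ w hInv.jsz
                    (by intro p hp; simp at hp; rw [hp]; constructor <;> omega)]
                  rcases he with ⟨rfl, _, _⟩ | ⟨rfl, hge⟩
                  · exact Or.inr ⟨(v * 2, s + 1), by simp, rfl⟩
                  · left
                    by_cases hb : pvGet (pvSet vis (v * 2)) (v - 1) = true
                    · rwa [pvGet_pvSet_ne vis (v * 2) (v - 1) (by omega) (by omega)] at hb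
                    · exact absurd ⟨hge, by simpa using hb⟩ hc2)
            simp only [List.foldl] at hI2 hM2
            exact ih _ _ hI2 (by omega)
        · rw [if_neg hc1]
          have hdbl : ∀ w, w = v * 2 → v < T → v * 2 ≤ 20000 → pvGet vis (v * 2) = true := by
            intro w _ h1 h2
            by_cases hb : pvGet vis (v * 2) = true
            · exact hb
            · exact absurd ⟨h1, h2, by simpa using hb⟩ hc1
          by_cases hc3 : 1 ≤ v - 1 ∧ pvGet vis (v - 1) = false
          · rw [if_pos hc3]
            obtain ⟨hI2, hM2⟩ := pvStep S T hS hST hT v s Q' vis hInv hvT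
              [(v - 1, s + 1)]
              (by intro p hp; simp at hp; rw [hp])
              (by intro p hp; simp at hp; rw [hp]
                  exact ⟨Or.inr ⟨rfl, hc3.1⟩, hc3.2⟩)
              (by simp)
              (by intro w he
                  rw [pvFoldSet_true vis _ w hInv.jsz
                    (by intro p hp; simp at hp; rw [hp]; constructor <;> omega)]
                  rcases he with ⟨rfl, h1, h2⟩ | ⟨rfl, _⟩
                  · exact Or.inl (hdbl _ rfl h1 h2)
                  · exact Or.inr ⟨(v - 1, s + 1), by simp, rfl⟩)
            simp only [List.foldl] at hI2 hM2
            exact ih _ _ hI2 (by omega)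
          · rw [if_neg hc3]
            obtain ⟨hI2, hM2⟩ := pvStep S T hS hST hT v s Q' vis hInv hvT
              []
              (by intro p hp; simp at hp)
              (by intro p hp; simp at hp)
              (by simp)
              (by intro w he
                  rw [pvFoldSet_true vis _ w hInv.jsz (by intro p hp; simp at hp)]
                  rcases he with ⟨rfl, h1, h2⟩ | ⟨rfl, hge⟩
                  · exact Or.inl (hdbl _ rfl h1 h2)
                  · left
                    by_cases hb : pvGet vis (v - 1) = true
                    · exact hb
                    · exact absurd ⟨hge, by simpa using hb⟩ hc3)
            have hap : Q' ++ ([] : List (Int × Int)) = Q' := List.append_nil _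
            rw [hap] at hI2 hM2
            simp only [List.foldl] at hI2 hM2
            exact ih _ _ hI2 (by omega)

theorem bfs_init (S T : Int) (hS : 1 ≤ S) (hST : S < T) (hT : T ≤ 20000) :
    pvInv S T [(S, 0)] (pvSet (Array.replicate 20001 false) S) := by
  have hrep : ∀ u : Int, pvGet (Array.replicate 20001 false) u = false := by
    intro u
    unfold pvGet
    rcases Nat.lt_or_ge u.toNat 20001 with h | h
    · simp [h]
    · rw [Array.getElem?_eq_none (by rw [Array.size_replicate]; exact h)]
      rfl
  have hvS : pvGet (pvSet (Array.replicate 20001 false) S) S = true :=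
    pvGet_pvSet_self _ S (by omega) (by rw [Array.size_replicate]; omega)
  have honly : ∀ u, pvGet (pvSet (Array.replicate 20001 false) S) u = true → u = S := by
    intro u hu
    by_contra hne
    rw [pvGet_pvSet_ne _ S u hS hne, hrep u] at hu
    simp at hu
  refine ⟨?_, ?_, ?_, ?_, ?_, ?_, hvS, ?_⟩
  · intro p hp
    simp only [List.mem_singleton] at hp
    subst hp
    exact ⟨hvS, 0, by simp, pvReach.base, fun m _ => Nat.zero_le m⟩
  · simp
  · intro p hp q hq
    simp only [List.mem_singleton] at hp hq
    subst hp; subst hq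
    simp only; omega
  · intro u hu hno w he
    exact absurd (honly u hu).symm (hno (S, 0) (by simp))
  · intro u m hd hq
    have h0 : (m : Int) ≤ 0 := hq (S, 0) (by simp)
    have hm : m = 0 := by omega
    subst hm
    rcases pvReach_inv S T u 0 hd.1 with ⟨_, rfl⟩ | ⟨p, m', hm', _, _⟩
    · exact hvS
    · omega
  · intro h
    exact absurd (honly T h) (by omega)
  · rw [pvSet_size, Array.size_replicate]

theorem bfs_initM (S : Int) :
    pvM [(S, 0)] (pvSet (Array.replicate 20001 false) S) < 40002 := by
  have h : pvCnt (pvSet (Array.replicate 20001 false) S) ≤ 20000 := by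
    have := Finset.card_filter_le (Finset.Icc (1 : Int) 20000)
      (fun x => pvGet (pvSet (Array.replicate 20001 false) S) x = false)
    have hc : (Finset.Icc (1 : Int) 20000).card = 20000 := by
      rw [Int.card_Icc]; rfl
    unfold pvCnt; omega
  unfold pvM; simp only [List.length_singleton]; omega

-- ===== B side =====

theorem altLoop_succ (S : Int) (f : Nat) (t c : Int) :
    altLoop S (f + 1) t c =
      if t > S then
        if PySem.Int.mod t 2 ≠ 0 then altLoop S f (t + 1) (c + 1)
        else altLoop S f (PySem.Int.floordiv t 2) (c + 1)
      else some (t, c) := rfl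

theorem altLoop_spec (S : Int) (hS : 1 ≤ S) :
    ∀ (n : Nat) (f : Nat) (t c : Int), 2 * n + 2 ≤ f → 1 ≤ t → t ≤ 2 ^ n →
      ∃ t' c', altLoop S f t c = some (t', c') ∧ c' + (S - t') = c + ((pvG S t : Nat) : Int) := by
  intro n
  induction n with
  | zero =>
    intro f t c hf h1 h2
    obtain ⟨f', rfl⟩ : ∃ f', f = f' + 1 := ⟨f - 1, by omega⟩
    rw [altLoop_succ, if_neg (by norm_num at h2; omega : ¬ t > S)]
    refine ⟨t, c, rfl, ?_⟩
    rw [pvG_le S t hS (by norm_num at h2; omega)]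
    norm_num at h2
    omega
  | succ n ih =>
    intro f t c hf h1 h2
    have hpow : (2 : Int) ^ (n + 1) = 2 * 2 ^ n := by ring
    have hpow1 : (0 : Int) < 2 ^ n := by positivity
    obtain ⟨f', rfl⟩ : ∃ f', f = f' + 1 := ⟨f - 1, by omega⟩
    rw [altLoop_succ]
    by_cases ht : t > S
    · rw [if_pos ht]
      have hmod : PySem.Int.mod t 2 = t % 2 := PySem.Int.mod_eq_emod_of_pos (by norm_num)
      by_cases hodd : PySem.Int.mod t 2 ≠ 0
      · rw [if_pos hodd]
        rw [hmod] at hodd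
        obtain ⟨f'', rfl⟩ : ∃ f'', f' = f'' + 1 := ⟨f' - 1, by omega⟩
        have hmod2 : PySem.Int.mod (t + 1) 2 = (t + 1) % 2 :=
          PySem.Int.mod_eq_emod_of_pos (by norm_num)
        rw [altLoop_succ, if_pos (by omega : t + 1 > S),
          if_neg (by rw [hmod2]; omega)]
        have hfd : PySem.Int.floordiv (t + 1) 2 = (t + 1) / 2 :=
          PySem.Int.floordiv_eq_ediv_of_pos (by norm_num)
        rw [hfd]
        obtain ⟨t', c', heq, hval⟩ := ih f'' ((t + 1) / 2) (c + 1 + 1)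
          (by omega) (by omega) (by omega)
        refine ⟨t', c', heq, ?_⟩
        rw [pvG_odd S t hS (by omega) (by omega)]
        push_cast at hval ⊢
        omega
      · rw [if_neg hodd]
        rw [hmod] at hodd
        have hfd : PySem.Int.floordiv t 2 = t / 2 :=
          PySem.Int.floordiv_eq_ediv_of_pos (by norm_num)
        rw [hfd]
        obtain ⟨t', c', heq, hval⟩ := ih f' (t / 2) (c + 1) (by omega) (by omega) (by omega)
        refine ⟨t', c', heq, ?_⟩
        rw [pvG_even S t hS (by omega) (by omega)]
        push_cast at hval ⊢
        omega
    · rw [if_neg ht]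
      refine ⟨t, c, rfl, ?_⟩
      rw [pvG_le S t hS (by omega)]
      omega

theorem solve_alt_eq (S T : Int) (hS : 1 ≤ S) (hST : S < T) (hT : T ≤ 20000) :
    solve_alt S T = PySem.Int.toStr ((pvG S T : Nat) : Int) := by
  have h15 : (2 : Int) ^ 15 = 32768 := by norm_num
  obtain ⟨t', c', heq, hval⟩ := altLoop_spec S hS 15 64 T 0 (by omega) (by omega) (by omega)
  unfold solve_alt
  rw [heq]
  show PySem.Int.toStr (c' + S - t') = _
  have h2 : c' + S - t' = ((pvG S T : Nat) : Int) := by omega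
  rw [h2]

-- ===== VERDICT (by name: the statement is the Claim_ definition above) =====
theorem solve_spec : Claim_equal_solve := by
  intro S T hD hPre
  unfold Spec_solve
  by_cases h : T ≤ S
  · unfold solve solve_alt
    rw [if_pos (by omega : S ≥ T)]
    rw [show (64 : Nat) = 63 + 1 from rfl, altLoop_succ, if_neg (by omega : ¬ T > S)]
    show _ = PySem.Int.toStr ((0 : Int) + S - T)
    have h2 : (0 : Int) + S - T = S - T := by omega
    rw [h2]
  · rcases hPre with h' | ⟨hS, hST, hT⟩
    · omega
    · unfold solve
      rw [if_neg (by omega : ¬ S ≥ T)]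
      rw [bfs_main S T hS hST hT 40002 _ _ (bfs_init S T hS hST hT) (bfs_initM S)]
      exact (solve_alt_eq S T hS hST hT).symm
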